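-- pv_equiv track=rewrite | github.com/bwdpaepe/dodona | oefening6.py | letterfrequenties
-- ===== SOURCE A (Python) =====
-- def letterfrequenties(inputstring):
--     alfabetfrequentie={'a':0,'b':0,'c':0,'d':0,'e':0,'f':0,'g':0,'h':0,'i':0,'j':0,'k':0,'l':0,'m':0,'n':0,'o':0,'p':0,'q':0,'r':0,'s':0,'t':0,'u':0,'v':0,'w':0,'x':0,'y':0,'z':0}
--     alfabetlist=['a','b','c','d','e','f','g','h','i','j','k','l','m','n','o','p','q','r','s','t','u','v','w','x','y','z']
--     for item in inputstring:
--         loweritem = item.lower()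
--         if loweritem in alfabetlist:
--             alfabetfrequentie[loweritem] += 1
--     returnfrequentie = alfabetfrequentie.copy()
--     for k, v in alfabetfrequentie.items():
--         if v == 0:
--             del returnfrequentie[k]
--     return returnfrequentie
-- ===== SOURCE B (Python) =====
-- def letterfrequenties(inputstring):
--     lo = inputstring.lower()
--     return {c: n for c in 'abcdefghijklmnopqrstuvwxyz' if (n := lo.count(c))}
-- ===== Notes on version B (the rewrite author's own statement) =====
-- stated objective: idiomatic
-- what changed: Replaces A's pre-populated 26-key dict, per-character increment loop and separate zero-deletion pass with a single dict comprehension that lowercases the string once and counts each alphabet letter with str.count, recording only letters that occur.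
import Mathlib
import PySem

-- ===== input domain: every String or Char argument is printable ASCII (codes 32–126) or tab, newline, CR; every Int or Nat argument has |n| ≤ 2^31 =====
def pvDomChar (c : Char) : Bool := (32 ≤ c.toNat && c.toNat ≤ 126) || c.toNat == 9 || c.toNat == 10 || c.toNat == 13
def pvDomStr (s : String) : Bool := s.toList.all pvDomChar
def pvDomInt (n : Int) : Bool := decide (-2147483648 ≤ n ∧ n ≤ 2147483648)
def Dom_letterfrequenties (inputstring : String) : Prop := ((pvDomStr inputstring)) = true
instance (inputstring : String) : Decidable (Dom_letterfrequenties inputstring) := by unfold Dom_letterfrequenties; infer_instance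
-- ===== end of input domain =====

-- B replaces A's pre-populated 26-key dict + zero-deletion pass by a single dict comprehension
-- counting each alphabet letter in the lowered string (objective: simpler/idiomatic; same asymptotic cost).

-- ===== PORT A =====
def pvAlfabetlist : List String :=
  ["a","b","c","d","e","f","g","h","i","j","k","l","m","n","o","p","q","r","s","t","u","v","w","x","y","z"]

def letterfrequenties (inputstring : String) : List (String × Int) :=
  let alfabetfrequentie : PySem.Dict String Int := PySem.Dict.ofList
    [("a",0),("b",0),("c",0),("d",0),("e",0),("f",0),("g",0),("h",0),("i",0),("j",0),("k",0),("l",0),("m",0),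
     ("n",0),("o",0),("p",0),("q",0),("r",0),("s",0),("t",0),("u",0),("v",0),("w",0),("x",0),("y",0),("z",0)]
  let alfabetfrequentie := inputstring.toList.foldl
    (fun d item =>
      let loweritem := PySem.Str.lower (String.ofList [item])
      if loweritem ∈ pvAlfabetlist then d.modify loweritem 0 (· + 1) else d)
    alfabetfrequentie
  let returnfrequentie := alfabetfrequentie.items.foldl
    (fun r kv => if kv.2 = 0 then r.erase kv.1 else r)
    alfabetfrequentie
  returnfrequentie.items

-- ===== PORT B =====
def letterfrequenties_alt (inputstring : String) : List (String × Int) :=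
  let lo := PySem.Str.lower inputstring
  "abcdefghijklmnopqrstuvwxyz".toList.filterMap (fun c =>
    let n : Int := (PySem.Str.count lo (String.ofList [c]) : Int)
    if n = 0 then none else some (String.ofList [c], n))

-- ===== PRECONDITION & SPEC =====
def Spec_letterfrequenties (inputstring : String) (out : List (String × Int)) : Prop := out = letterfrequenties_alt inputstring
instance (inputstring : String) (out : List (String × Int)) : Decidable (Spec_letterfrequenties inputstring out) := by unfold Spec_letterfrequenties; infer_instance

-- ===== CLAIM (what is proved, stated in full; the proofs are below) =====
def Claim_equal_letterfrequenties : Prop := ∀ (inputstring : String), Dom_letterfrequenties inputstring → Spec_letterfrequenties inputstring (letterfrequenties inputstring)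

-- ===== LEMMAS AND PROOFS =====

-- str.count with a single-character needle is the character count
theorem pv_count_go_singleton (c : Char) (cs : List Char) (fuel acc : Nat) (h : cs.length ≤ fuel) :
    PySem.Chars.count.go [c] fuel cs acc = acc + cs.count c := by
  induction cs generalizing fuel acc with
  | nil => cases fuel <;> simp [PySem.Chars.count.go]
  | cons x t ih =>
    cases fuel with
    | zero => simp at h
    | succ f =>
      simp only [PySem.Chars.count.go]
      by_cases hx : c = x
      · subst hx
        simp only [List.isPrefixOf, BEq.rfl, Bool.true_and, if_true]
        rw [List.length_cons, Nat.succ_le_succ_iff] at h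
        rw [List.length_singleton, List.drop_one, List.tail_cons, ih f (acc + 1) h]
        simp
        omega
      · have : ([c].isPrefixOf (x :: t)) = false := by
          simp [List.isPrefixOf]; exact fun hcx => hx (by simpa using hcx)
        rw [List.length_cons, Nat.succ_le_succ_iff] at h
        simp only [this, ih f acc h, List.count_cons]
        simp [Ne.symm hx]

theorem pv_count_singleton (cs : List Char) (c : Char) :
    PySem.Chars.count cs [c] = cs.count c := by
  simp [PySem.Chars.count]
  rw [pv_count_go_singleton c cs cs.length 0 le_rfl, Nat.zero_add]

def pvAZ : List Char := "abcdefghijklmnopqrstuvwxyz".toList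

theorem pv_alfabetlist_eq : pvAlfabetlist = pvAZ.map (fun c => String.ofList [c]) := by decide

-- membership of the lowered singleton string in the alphabet list
theorem pv_mem_alfabetlist (x : Char) :
    (String.ofList [x] ∈ pvAlfabetlist) ↔ x ∈ pvAZ := by
  rw [pv_alfabetlist_eq]
  constructor
  · intro h
    rcases List.mem_map.mp h with ⟨c, hc, he⟩
    have hxc : x = c := by
      have := congrArg String.toList he
      simpa using this.symm
    subst hxc; exact hc
  · intro h; exact List.mem_map_of_mem h

-- every PySem.Set.update by elements already present is the identity
theorem pv_set_update_of_mem {α : Type} [BEq α] [LawfulBEq α] (xs : List α) (s : PySem.Set α)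
    (h : ∀ x ∈ xs, x ∈ s) : PySem.Set.update s xs = s := by
  induction xs generalizing s with
  | nil => rfl
  | cons x t ih =>
    have hx : PySem.Set.add s x = s := by
      have : PySem.Set.contains s x = true := by
        simpa [PySem.Set.contains, List.contains_iff_mem] using h x (by simp)
      simp only [PySem.Set.add, this, if_true]
    simp only [PySem.Set.update, List.foldl_cons, hx]
    exact ih s (fun y hy => h y (by simp [hy]))

-- a dict whose items all carry value 0 looks up to 0 everywhere
theorem pv_getD_zero {κ : Type} [BEq κ] (d : PySem.Dict κ Int) (k : κ)
    (h : ∀ p ∈ d.items, p.2 = (0 : Int)) : d.getD k 0 = 0 := by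
  unfold PySem.Dict.getD PySem.Dict.get?
  cases hf : d.items.find? (fun p => p.1 == k) with
  | none => rfl
  | some p => simp [h p (List.mem_of_find?_eq_some hf)]

-- folding erase over a key list filters the items
theorem pv_items_foldl_erase {κ ν : Type} [BEq κ] (zs : List κ) (e : PySem.Dict κ ν) :
    (zs.foldl PySem.Dict.erase e).items = e.items.filter (fun q => !zs.contains q.1) := by
  induction zs generalizing e with
  | nil => simp
  | cons z t ih =>
    simp only [List.foldl_cons, ih, PySem.Dict.erase, List.filter_filter]
    apply List.filter_congr
    intro q _
    simp [List.contains_cons, Bool.not_or, Bool.and_comm]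

-- filterMap of an if-none-some is map-over-filter
theorem pv_filterMap_ite {α β : Type} (l : List α) (p : α → Prop) [DecidablePred p] (g : α → β) :
    (l.filterMap (fun x => if p x then none else some (g x))) =
      (l.filter (fun x => decide (¬ p x))).map g := by
  induction l with
  | nil => rfl
  | cons x t ih =>
    by_cases hx : p x <;> simp [hx, ih]

-- ===== VERDICT (by name: the statement is the Claim_ definition above) =====
theorem letterfrequenties_spec : Claim_equal_letterfrequenties := by
  intro s _
  unfold Spec_letterfrequenties letterfrequenties letterfrequenties_alt
  set d0 : PySem.Dict String Int := PySem.Dict.ofList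
    [("a",0),("b",0),("c",0),("d",0),("e",0),("f",0),("g",0),("h",0),("i",0),("j",0),("k",0),("l",0),("m",0),
     ("n",0),("o",0),("p",0),("q",0),("r",0),("s",0),("t",0),("u",0),("v",0),("w",0),("x",0),("y",0),("z",0)] with hd0
  -- abbreviations
  have hd0items : d0.items = pvAlfabetlist.map (fun k => (k, (0 : Int))) := by rw [hd0]; decide
  have hd0keys : d0.keys = pvAlfabetlist := by rw [hd0]; decide
  -- step 1: normalise the counting loop into a fold of modify over a key list L
  have hbody : (fun (d : PySem.Dict String Int) (item : Char) =>
      let loweritem := PySem.Str.lower (String.ofList [item])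
      if loweritem ∈ pvAlfabetlist then d.modify loweritem 0 (· + 1) else d)
    = (fun d item => if PySem.Chars.lowerChar item ∈ pvAZ
        then d.modify (String.ofList [PySem.Chars.lowerChar item]) 0 (· + 1) else d) := by
    funext d item
    have hl : PySem.Str.lower (String.ofList [item]) = String.ofList [PySem.Chars.lowerChar item] := by
      simp [PySem.Str.lower, PySem.Chars.lower]
    simp only [hl]
    by_cases hm : PySem.Chars.lowerChar item ∈ pvAZ
    · rw [if_pos ((pv_mem_alfabetlist _).mpr hm), if_pos hm]
    · rw [if_neg (fun h => hm ((pv_mem_alfabetlist _).mp h)), if_neg hm]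
  rw [hbody]
  show (List.foldl (fun r kv => if kv.2 = 0 then r.erase kv.1 else r)
          (List.foldl (fun d item => if PySem.Chars.lowerChar item ∈ pvAZ
              then d.modify (String.ofList [PySem.Chars.lowerChar item]) 0 (· + 1) else d) d0 s.toList)
          (List.foldl (fun d item => if PySem.Chars.lowerChar item ∈ pvAZ
              then d.modify (String.ofList [PySem.Chars.lowerChar item]) 0 (· + 1) else d) d0 s.toList).items).items
      = List.filterMap (fun c =>
          if ((PySem.Str.count (PySem.Str.lower s) (String.ofList [c]) : Nat) : Int) = 0 then none
          else some (String.ofList [c], ((PySem.Str.count (PySem.Str.lower s) (String.ofList [c]) : Nat) : Int)))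
          "abcdefghijklmnopqrstuvwxyz".toList
  set F : List Char := (s.toList.map PySem.Chars.lowerChar).filter (fun x => decide (x ∈ pvAZ)) with hF
  set L : List String := F.map (fun x => String.ofList [x]) with hL
  have hloop : s.toList.foldl (fun d item => if PySem.Chars.lowerChar item ∈ pvAZ
        then d.modify (String.ofList [PySem.Chars.lowerChar item]) 0 (· + 1) else d) d0
      = L.foldl (fun d k => d.modify k 0 (· + 1)) d0 := by
    rw [hL, List.foldl_map, hF, ← PySem.List.foldl_ite_eq_foldl_filter (fun x => x ∈ pvAZ)
      (fun d x => PySem.Dict.modify d (String.ofList [x]) 0 (· + 1)), List.foldl_map]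
  rw [hloop]
  set d1 : PySem.Dict String Int := L.foldl (fun d k => d.modify k 0 (· + 1)) d0 with hd1
  -- step 2: characterise d1
  have hkeys : d1.keys = pvAlfabetlist := by
    rw [hd1]
    have := PySem.Dict.keys_foldl_modify L (0 : Int) (fun _ _ => (· + 1)) d0
    rw [this, hd0keys]
    apply pv_set_update_of_mem
    intro k hk
    rcases List.mem_map.mp hk with ⟨x, hx, rfl⟩
    exact (pv_mem_alfabetlist x).mpr (List.of_mem_filter hx |> fun h => by simpa using h)
  have hgetD : ∀ k, d1.getD k 0 = (L.count k : Int) := by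
    intro k
    rw [hd1, PySem.Dict.getD_foldl_modify_add_one, pv_getD_zero d0 k
      (by rw [hd0items]; intro p hp; rcases List.mem_map.mp hp with ⟨q, _, rfl⟩; rfl), Int.zero_add]
  have hnd : pvAlfabetlist.Nodup := by decide
  have hitems : d1.items = pvAlfabetlist.map (fun k => (k, (L.count k : Int))) := by
    rw [PySem.Dict.items_eq_map_keys d1 (hkeys ▸ hnd) 0, hkeys]
    exact List.map_congr_left (fun k _ => by rw [hgetD k])
  -- step 3: the zero-deletion loop is an items filter
  rw [PySem.List.foldl_ite_eq_foldl_filter (fun kv : String × Int => kv.2 = 0)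
      (fun r kv => PySem.Dict.erase r kv.1)]
  have hfoldmap : (d1.items.filter (fun kv => decide (kv.2 = 0))).foldl
        (fun r kv => PySem.Dict.erase r kv.1) d1
      = ((d1.items.filter (fun kv => decide (kv.2 = 0))).map Prod.fst).foldl PySem.Dict.erase d1 := by
    rw [List.foldl_map]
  rw [hfoldmap, pv_items_foldl_erase]
  set zs : List String := (d1.items.filter (fun kv => decide (kv.2 = 0))).map Prod.fst with hzs
  have hzs' : zs = pvAlfabetlist.filter (fun k => decide ((L.count k : Int) = 0)) := by
    rw [hzs, hitems, List.filter_map, List.map_map]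
    simp [Function.comp_def]
  -- step 4: fold both sides into the same filtered map over pvAZ
  have hA : d1.items.filter (fun q => !zs.contains q.1)
      = (pvAZ.filter (fun c => decide (¬ ((s.toList.map PySem.Chars.lowerChar).count c : Int) = 0))).map
          (fun c => (String.ofList [c], ((s.toList.map PySem.Chars.lowerChar).count c : Int))) := by
    have hcnt : ∀ c ∈ pvAZ, (L.count (String.ofList [c]) : Int)
        = ((s.toList.map PySem.Chars.lowerChar).count c : Int) := by
      intro c hc
      rw [hL, List.count_map_of_injective F (fun x => String.ofList [x])
        (fun a b hab => by simpa using congrArg String.toList hab) c, hF,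
        List.count_filter (by simpa using hc)]
    rw [hitems, pv_alfabetlist_eq, List.filter_map, List.filter_map, List.map_map]
    simp only [Function.comp_def]
    have hpred : ∀ c ∈ pvAZ, (!zs.contains (String.ofList [c], (L.count (String.ofList [c]) : Int)).1)
        = decide (¬ ((s.toList.map PySem.Chars.lowerChar).count c : Int) = 0) := by
      intro c hc
      simp only [hzs', List.contains_eq_mem, ← hcnt c hc]
      by_cases h0 : (L.count (String.ofList [c]) : Int) = 0
      · have h0' : L.count (String.ofList [c]) = 0 := by exact_mod_cast h0
        simp [List.mem_filter, h0', (pv_alfabetlist_eq ▸ List.mem_map_of_mem hc : String.ofList [c] ∈ pvAlfabetlist)]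
      · have h0' : ¬ L.count (String.ofList [c]) = 0 := by exact_mod_cast h0
        simp [List.mem_filter, h0']
    rw [List.filter_congr hpred]
    apply List.map_congr_left
    intro c hc
    rw [hcnt c (List.mem_of_mem_filter hc)]
  rw [hA]
  -- step 5: B is the same filtered map
  rw [pv_filterMap_ite "abcdefghijklmnopqrstuvwxyz".toList (fun c => ((PySem.Str.count (PySem.Str.lower s) (String.ofList [c]) : Int) = 0))
      (fun c => (String.ofList [c], (PySem.Str.count (PySem.Str.lower s) (String.ofList [c]) : Int)))]
  have hn : ∀ c, (PySem.Str.count (PySem.Str.lower s) (String.ofList [c]) : Int)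
      = ((s.toList.map PySem.Chars.lowerChar).count c : Int) := by
    intro c
    rw [PySem.Str.count]
    norm_cast
    rw [String.toList_ofList, pv_count_singleton]
    congr 1
    simp [PySem.Chars.lower]
  simp only [hn]
  unfold pvAZ
  rfl
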